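-- pv_equiv track=rewrite | github.com/pypi-data/pypi-mirror-395 | packages/lheutils/lheutils-0.0.3.tar.gz/lheutils-0.0.3/src/lheutils/cli/lhefilter.py | matches_event_filter
-- ===== SOURCE A (Python) =====
-- from typing import Optional
--
-- def matches_event_filter(
--     event_index: int,
--     include_event_ranges: Optional[list[tuple[int, int]]],
--     exclude_event_ranges: Optional[list[tuple[int, int]]],
-- ) -> bool:
--     """Check if event matches event number filters."""
--     # event_index is 0-based, but user input is 1-based
--     event_number = event_index + 1
--
--     # Check include ranges
--     if include_event_ranges is not None:
--         matches_include = False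
--         for start, end in include_event_ranges:
--             if end == -1:  # Open upper bound
--                 if event_number >= start:
--                     matches_include = True
--                     break
--             elif start <= event_number <= end:
--                 matches_include = True
--                 break
--         if not matches_include:
--             return False
--
--     # Check exclude ranges
--     if exclude_event_ranges is not None:
--         for start, end in exclude_event_ranges:
--             if end == -1:  # Open upper bound
--                 if event_number >= start:
--                     return False
--             elif start <= event_number <= end:
--                 return False
--
--     return True
-- ===== SOURCE B (Python) =====
-- from typing import Optional
--
-- def covered(n: int, ranges: list) -> bool:
--     """Is n in the union of the ranges?  Sort by start, scan with early exit:
--     once a start exceeds n, no later range (sorted order) can contain n."""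
--     for start, end in sorted(ranges, key=lambda r: r[0]):
--         if start > n:
--             break
--         if end == -1 or end >= n:
--             return True
--     return False
--
-- def matches_event_filter(
--     event_index: int,
--     include_event_ranges,
--     exclude_event_ranges,
-- ) -> bool:
--     """Check if event matches event number filters (sort-then-early-exit scan)."""
--     n = event_index + 1
--     return (include_event_ranges is None or covered(n, include_event_ranges)) and \
--            (exclude_event_ranges is None or not covered(n, exclude_event_ranges))
-- ===== Notes on version B (the rewrite author's own statement) =====
-- stated objective: alternative
-- what changed: B sorts each range list by start and scans with an early exit (break once start > n, and a simplified containment test since start <= n is then known), returning one boolean expression instead of A's flag-with-break and direct-return loops; correctness rests on union membership being order-independent.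
import Mathlib
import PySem

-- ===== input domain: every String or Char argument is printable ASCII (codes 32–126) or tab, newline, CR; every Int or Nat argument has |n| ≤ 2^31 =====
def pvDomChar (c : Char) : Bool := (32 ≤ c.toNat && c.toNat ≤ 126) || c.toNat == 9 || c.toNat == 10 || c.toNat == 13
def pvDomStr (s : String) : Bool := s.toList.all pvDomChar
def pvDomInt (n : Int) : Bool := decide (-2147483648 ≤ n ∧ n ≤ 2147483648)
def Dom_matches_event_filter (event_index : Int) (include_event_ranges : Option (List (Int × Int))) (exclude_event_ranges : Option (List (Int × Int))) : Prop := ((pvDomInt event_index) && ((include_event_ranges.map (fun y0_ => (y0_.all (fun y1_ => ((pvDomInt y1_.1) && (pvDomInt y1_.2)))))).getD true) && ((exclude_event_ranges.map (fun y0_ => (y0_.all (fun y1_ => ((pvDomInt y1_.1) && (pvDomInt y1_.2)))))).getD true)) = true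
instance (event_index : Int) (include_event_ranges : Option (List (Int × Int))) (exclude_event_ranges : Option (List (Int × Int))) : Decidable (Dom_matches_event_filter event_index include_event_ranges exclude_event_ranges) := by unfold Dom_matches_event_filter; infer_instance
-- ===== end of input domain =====

-- B replaces A's two unsorted scans (flag+break include loop, direct-return exclude loop) by a
-- shared sort-by-start + early-exit scan; objective: alternative (order-independence is proved).

-- ===== PORT A =====
-- A's include loop: flag matches_include with break, transcribed as a recursion returning the flag.
def pvAIncLoop (n : Int) : List (Int × Int) → Bool
  | [] => false
  | (s, e) :: rest =>
    if e = -1 then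
      if n ≥ s then true else pvAIncLoop n rest
    else if s ≤ n ∧ n ≤ e then true else pvAIncLoop n rest

-- A's exclude loop: returns False on a match, True after the loop.
def pvAExcLoop (n : Int) : List (Int × Int) → Bool
  | [] => true
  | (s, e) :: rest =>
    if e = -1 then
      if n ≥ s then false else pvAExcLoop n rest
    else if s ≤ n ∧ n ≤ e then false else pvAExcLoop n rest

def matches_event_filter (event_index : Int) (include_event_ranges : Option (List (Int × Int))) (exclude_event_ranges : Option (List (Int × Int))) : Bool :=
  let event_number := event_index + 1
  match include_event_ranges with
  | some rs =>
    if ¬ (pvAIncLoop event_number rs = true) then false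
    else
      match exclude_event_ranges with
      | some es => pvAExcLoop event_number es
      | none => true
  | none =>
    match exclude_event_ranges with
    | some es => pvAExcLoop event_number es
    | none => true

-- ===== PORT B =====
-- B's early-exit scan over the sorted-by-start list: break once start > n.
def pvCoveredScan (n : Int) : List (Int × Int) → Bool
  | [] => false
  | (s, e) :: rest =>
    if s > n then false
    else if e = -1 ∨ e ≥ n then true
    else pvCoveredScan n rest

def pvCovered (n : Int) (ranges : List (Int × Int)) : Bool :=
  pvCoveredScan n (PySem.List.sorted ranges (fun r => r.1) false)

def matches_event_filter_alt (event_index : Int) (include_event_ranges : Option (List (Int × Int))) (exclude_event_ranges : Option (List (Int × Int))) : Bool :=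
  let n := event_index + 1
  (match include_event_ranges with
   | none => true
   | some rs => pvCovered n rs) &&
  (match exclude_event_ranges with
   | none => true
   | some es => !pvCovered n es)

-- ===== PRECONDITION & SPEC =====
def Spec_matches_event_filter (event_index : Int) (include_event_ranges : Option (List (Int × Int))) (exclude_event_ranges : Option (List (Int × Int))) (out : Bool) : Prop := out = matches_event_filter_alt event_index include_event_ranges exclude_event_ranges
instance (event_index : Int) (include_event_ranges : Option (List (Int × Int))) (exclude_event_ranges : Option (List (Int × Int))) (out : Bool) : Decidable (Spec_matches_event_filter event_index include_event_ranges exclude_event_ranges out) := by unfold Spec_matches_event_filter; infer_instance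

-- ===== CLAIM (what is proved, stated in full; the proofs are below) =====
def Claim_equal_matches_event_filter : Prop := ∀ (event_index : Int) (include_event_ranges : Option (List (Int × Int))) (exclude_event_ranges : Option (List (Int × Int))), Dom_matches_event_filter event_index include_event_ranges exclude_event_ranges → Spec_matches_event_filter event_index include_event_ranges exclude_event_ranges (matches_event_filter event_index include_event_ranges exclude_event_ranges)

-- ===== LEMMAS AND PROOFS =====
-- the order-independent spec both programs compute: "some range contains n"
def pvContains (n : Int) (p : Int × Int) : Bool :=
  if p.2 = -1 then decide (n ≥ p.1) else decide (p.1 ≤ n ∧ n ≤ p.2)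

theorem pvAIncLoop_eq_any (n : Int) (rs : List (Int × Int)) :
    pvAIncLoop n rs = rs.any (pvContains n) := by
  induction rs with
  | nil => rfl
  | cons p rest ih =>
    obtain ⟨s, e⟩ := p
    simp only [pvAIncLoop, pvContains, List.any_cons] at *
    by_cases h1 : e = -1
    · by_cases h2 : n ≥ s <;> simp [h1, h2, ih]
    · by_cases h2 : s ≤ n ∧ n ≤ e <;> simp [h1, h2, ih]

theorem pvAExcLoop_eq_not_any (n : Int) (rs : List (Int × Int)) :
    pvAExcLoop n rs = !rs.any (pvContains n) := by
  induction rs with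
  | nil => rfl
  | cons p rest ih =>
    obtain ⟨s, e⟩ := p
    simp only [pvAExcLoop, pvContains, List.any_cons] at *
    by_cases h1 : e = -1
    · by_cases h2 : n ≥ s <;> simp [h1, h2, ih]
    · by_cases h2 : s ≤ n ∧ n ≤ e <;> simp [h1, h2, ih]

-- on a start-sorted list the early-exit scan computes membership in the union
theorem pvCoveredScan_eq_any (n : Int) (ys : List (Int × Int))
    (hs : ys.Pairwise (fun a b => a.1 ≤ b.1)) :
    pvCoveredScan n ys = ys.any (pvContains n) := by
  induction ys with
  | nil => rfl
  | cons p rest ih =>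
    obtain ⟨s, e⟩ := p
    rw [List.pairwise_cons] at hs
    obtain ⟨hhd, htl⟩ := hs
    simp only [pvCoveredScan, pvContains, List.any_cons]
    by_cases h1 : s > n
    · -- head does not contain n, and no later range can: every later start ≥ s > n
      have hrest : rest.any (pvContains n) = false := by
        rw [List.any_eq_false]
        intro q hq
        have := hhd q hq
        simp only [pvContains]
        split_ifs with h2
        · simp; omega
        · simp; omega
      rw [if_pos h1, hrest]
      split_ifs with h2 <;> simp <;> omega
    · rw [if_neg h1]
      by_cases h2 : e = -1 ∨ e ≥ n
      · rw [if_pos h2]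
        rcases h2 with h2 | h2
        · simp [h2]; omega
        · by_cases h3 : e = -1 <;> simp [h3] <;> omega
      · rw [if_neg h2, ih htl]
        rw [not_or] at h2; rw [Int.not_le] at h2
        obtain ⟨h3, h4⟩ := h2
        simp [h3]; omega

theorem pvCovered_eq_any (n : Int) (rs : List (Int × Int)) :
    pvCovered n rs = rs.any (pvContains n) := by
  unfold pvCovered
  rw [pvCoveredScan_eq_any n _ (PySem.List.sorted_pairwise rs (fun r => r.1))]
  exact List.Perm.any_eq (PySem.List.sorted_perm rs (fun r => r.1) false)

-- ===== VERDICT (by name: the statement is the Claim_ definition above) =====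
theorem matches_event_filter_spec : Claim_equal_matches_event_filter := by
  intro ei inc exc _
  unfold Spec_matches_event_filter matches_event_filter matches_event_filter_alt
  cases inc <;> cases exc <;>
    simp [pvAIncLoop_eq_any, pvAExcLoop_eq_not_any, pvCovered_eq_any]
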